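-- pv_equiv track=rewrite | github.com/chaebum-kim/algorithm-problems | stack/stack07.py | make_balance
-- ===== SOURCE A (Python) =====
-- match = {'(': ')', ')': '('}
--
-- def make_balance(p):
--     if p == '':
--         return ''
--
--     u, v = divide(p)
--     if is_correct(u):
--         return u + make_balance(v)
--     else:
--         return '(' + make_balance(v) + ')' + flip(u[1:-1])
--
-- def is_correct(p):
--     stack = []
--     for x in p:
--         if x == '(':
--             stack.append(x)
--         else:
--             if stack and match[x] == stack[-1]:
--                 stack.pop()
--             else:
--                 return False
--     return True
--
-- def divide(p):
--     left, right, n = 0, 0, len(p)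
--     for i in range(n):
--         if p[i] == '(':
--             left += 1
--         else:
--             right += 1
--
--         if left == right:
--             break
--
--     return p[:i+1], p[i+1:]
--
-- def flip(p):
--     result = ''
--     for x in p:
--         result += match[x]
--     return result
-- ===== SOURCE B (Python) =====
-- def make_balance(p):
--     # Iterative: accumulate prefixes and suffixes instead of recursing.
--     prefixes, suffixes = [], []
--     while p:
--         # split at the first index where '(' and ')' counts are equal (one balance counter)
--         bal, cut = 0, len(p)
--         for i, ch in enumerate(p):
--             bal += 1 if ch == '(' else -1
--             if bal == 0:
--                 cut = i + 1
--                 break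
--         u, v = p[:cut], p[cut:]
--         # "correct" iff the depth never goes negative
--         ok, d = True, 0
--         for ch in u:
--             d = d + 1 if ch == '(' else d - 1
--             if d < 0:
--                 ok = False
--                 break
--         if ok:
--             prefixes.append(u)
--             suffixes.append('')
--         else:
--             prefixes.append('(')
--             suffixes.append(')' + ''.join('(' if c == ')' else ')' for c in u[1:-1]))
--         p = v
--     return ''.join(prefixes) + ''.join(reversed(suffixes))
-- ===== Notes on version B (the rewrite author's own statement) =====
-- stated objective: alternative
-- what changed: Recursion replaced by an iterative loop that accumulates prefix and suffix pieces (suffixes joined in reverse at the end); the stack-based correctness check becomes a single depth counter, and the two-counter split point a single balance counter. Pre_ excludes exactly the inputs on which A raises KeyError in its match dict (a non-parenthesis character at a position its algorithm actually looks up).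
import Mathlib
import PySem

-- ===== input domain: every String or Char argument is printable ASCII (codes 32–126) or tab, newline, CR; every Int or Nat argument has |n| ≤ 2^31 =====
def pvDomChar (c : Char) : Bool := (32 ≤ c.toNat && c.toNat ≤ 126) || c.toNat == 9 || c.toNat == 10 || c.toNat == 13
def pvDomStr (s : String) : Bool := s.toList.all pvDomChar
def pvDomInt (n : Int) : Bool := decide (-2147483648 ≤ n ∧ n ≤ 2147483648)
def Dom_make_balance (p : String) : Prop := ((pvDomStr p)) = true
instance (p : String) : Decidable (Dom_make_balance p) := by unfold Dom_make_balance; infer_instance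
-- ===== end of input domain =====

-- B replaces A's recursion by an iterative loop accumulating prefix/suffix pieces (alternative decomposition, not claimed faster).

-- ===== PORT A =====

-- match = {'(': ')', ')': '('}
def matchD : PySem.Dict Char Char := PySem.Dict.ofList [('(', ')'), (')', '(')]

-- is_correct's loop; the stack top (Python stack[-1]) is the list head.
-- Where Python raises KeyError (non-paren char with nonempty stack, outside Pre_), get? is none and the port returns false.
def isCorrectGo : List Char → List Char → Bool
  | _stack, [] => true
  | stack, x :: xs =>
    if x = '(' then isCorrectGo ('(' :: stack) xs
    else
      match stack with
      | top :: rest => if matchD.get? x = some top then isCorrectGo rest xs else false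
      | [] => false

def is_correctA (p : List Char) : Bool := isCorrectGo [] p

-- divide's loop: returns the final value of i (break index, or n-1 when the loop completes).
def divideGo : List Char → Int → Int → Nat → Nat
  | [], _, _, i => i - 1          -- loop exhausted: Python's i is n-1 (divide is never called with '')
  | c :: rest, left, right, i =>
    let left' := if c = '(' then left + 1 else left
    let right' := if c = '(' then right else right + 1
    if left' = right' then i else divideGo rest left' right' (i + 1)

-- p[:i+1], p[i+1:] with a Nat index are take/drop (PySem.List.slice_to_natCast / slice_from_natCast).
def divideA (p : List Char) : List Char × List Char :=
  let i := divideGo p 0 0 0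
  (p.take (i + 1), p.drop (i + 1))

-- flip: result += match[x]; placeholder where Python raises KeyError (outside Pre_).
def flipA (p : List Char) : List Char := p.foldl (fun acc x => acc ++ [matchD.getD x '?']) []

def mbA (p : List Char) : List Char :=
  match p with
  | [] => []
  | c :: rest =>
    let u := (divideA (c :: rest)).1
    let v := (divideA (c :: rest)).2
    if is_correctA u then u ++ mbA v
    else '(' :: (mbA v ++ ')' :: flipA (PySem.List.slice u (some 1) (some (-1))))
termination_by p.length
decreasing_by
  all_goals
    simp only [divideA, List.length_drop, List.length_cons]
    omega

def make_balance (p : String) : String := String.ofList (mbA p.toList)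

-- ===== PORT B =====

-- split point: first index i with balance 0 gives cut = i+1; default cut = len(p).
def cutGo : List Char → Int → Nat → Nat → Nat
  | [], _bal, _i, n => n
  | c :: rest, bal, i, n =>
    let bal' := bal + (if c = '(' then 1 else -1)
    if bal' = 0 then i + 1 else cutGo rest bal' (i + 1) n

-- "correct" iff the depth never goes negative.
def okGo : List Char → Int → Bool
  | [], _ => true
  | c :: rest, d =>
    let d' := if c = '(' then d + 1 else d - 1
    if d' < 0 then false else okGo rest d'

-- ''.join('(' if c == ')' else ')' for c in …)
def flipB (p : List Char) : List Char := p.map (fun c => if c = ')' then '(' else ')')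

-- cutGo returns i+1 for some visited i, or the default n; needed for the while loop's termination.
theorem cutGo_pos (cs : List Char) : ∀ (bal : Int) (i n : Nat), 1 ≤ n → 1 ≤ cutGo cs bal i n := by
  induction cs with
  | nil => intro bal i n h; simpa [cutGo] using h
  | cons c rest ih =>
    intro bal i n h
    simp only [cutGo]
    split <;> split <;> first | omega | exact ih _ _ n h

-- the while loop: p shrinks each iteration, prefixes/suffixes grow; join at the end.
def mbBGo (p : List Char) (pre suf : List (List Char)) : List Char :=
  match p with
  | [] => pre.flatten ++ suf.reverse.flatten
  | c :: rest =>
    let cut := cutGo (c :: rest) 0 0 (c :: rest).length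
    let u := (c :: rest).take cut
    let v := (c :: rest).drop cut
    if okGo u 0 then mbBGo v (pre ++ [u]) (suf ++ [[]])
    else mbBGo v (pre ++ [['(']]) (suf ++ [')' :: flipB (PySem.List.slice u (some 1) (some (-1)))])
termination_by p.length
decreasing_by
  all_goals
    simp only [List.length_drop, List.length_cons]
    have := cutGo_pos (c :: rest) 0 0 (c :: rest).length (by simp)
    simp only [List.length_cons] at this
    omega

def make_balance_alt (p : String) : String := String.ofList (mbBGo p.toList [] [])

-- ===== PRECONDITION & SPEC =====

def balW (c : Char) : Int := if c = '(' then 1 else -1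
def balS (l : List Char) : Int := l.foldl (fun b c => b + balW c) 0

-- Pre_ excludes exactly the inputs on which A raises KeyError in its match dict: a character other
-- than '(' or ')' is only tolerated by A where the running balance (counting '(' as +1, anything
-- else as -1) is 0, or is negative with the character closing its block or ending the string.
def preB (l : List Char) : Bool :=
  (List.range l.length).all (fun j =>
    (l.getD j ' ' == '(') || (l.getD j ' ' == ')') || (balS (l.take j) == 0)
    || (decide (balS (l.take j) < 0) && ((j == l.length - 1) || (balS (l.take (j + 1)) == 0))))

def Pre_make_balance (p : String) : Prop := preB p.toList = true
instance (p : String) : Decidable (Pre_make_balance p) := by unfold Pre_make_balance; infer_instance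

def pvWitness_make_balance : String := ")("

def Spec_make_balance (p : String) (out : String) : Prop := out = make_balance_alt p
instance (p : String) (out : String) : Decidable (Spec_make_balance p out) := by unfold Spec_make_balance; infer_instance

-- ===== CLAIM (what is proved, stated in full; the proofs are below) =====
def Claim_equal_make_balance : Prop := ∀ (p : String), Dom_make_balance p → Pre_make_balance p → Spec_make_balance p (make_balance p)

-- ===== LEMMAS AND PROOFS =====

def ParenOnly (l : List Char) : Prop := ∀ c ∈ l, c = '(' ∨ c = ')'

theorem balS_foldl (l : List Char) (b : Int) : l.foldl (fun b c => b + balW c) b = b + balS l := by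
  induction l generalizing b with
  | nil => simp [balS]
  | cons c r ih =>
    rw [List.foldl_cons, ih]
    have h2 := ih (0 + balW c)
    rw [show balS (c :: r) = List.foldl (fun b c => b + balW c) (0 + balW c) r from rfl, h2]
    omega

theorem balS_cons (c : Char) (l : List Char) : balS (c :: l) = balW c + balS l := by
  rw [show balS (c :: l) = List.foldl (fun b c => b + balW c) (0 + balW c) l from rfl, balS_foldl]
  omega

theorem balS_append (a b : List Char) : balS (a ++ b) = balS a + balS b := by
  simp only [balS, List.foldl_append]
  rw [balS_foldl]
  rfl

theorem balS_singleton (c : Char) : balS [c] = balW c := by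
  simp [balS]

theorem balW_cases (c : Char) : balW c = 1 ∨ balW c = -1 := by
  unfold balW; split <;> simp

theorem balS_take_succ (l : List Char) (j : Nat) (h : j < l.length) :
    balS (l.take (j + 1)) = balS (l.take j) + balW l[j] := by
  rw [List.take_add_one, List.getElem?_eq_getElem h]
  rw [show (some (l[j]'h)).toList = [l[j]'h] from rfl, balS_append, balS_singleton]

-- first index (0-based) at which the running balance from b hits 0, if any
def firstZero : List Char → Int → Option Nat
  | [], _ => none
  | c :: r, b =>
    let b' := b + balW c
    if b' = 0 then some 0 else (firstZero r b').map (· + 1)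

theorem cutGo_eq_firstZero : ∀ (cs : List Char) (b : Int) (i n : Nat),
    cutGo cs b i n = (match firstZero cs b with | some j => i + j + 1 | none => n) := by
  intro cs
  induction cs with
  | nil => intro b i n; rfl
  | cons c r ih =>
    intro b i n
    simp only [cutGo, firstZero, balW]
    by_cases h0 : b + (if c = '(' then 1 else -1) = 0
    · simp [h0]
    · simp only [if_neg h0]
      rw [ih]
      cases h : firstZero r (b + (if c = '(' then 1 else -1)) <;> first | (simp; omega) | simp

theorem firstZero_some : ∀ (cs : List Char) (b : Int) (j : Nat), firstZero cs b = some j →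
    j < cs.length ∧ b + balS (cs.take (j + 1)) = 0 ∧ (∀ m, m < j → b + balS (cs.take (m + 1)) ≠ 0) := by
  intro cs
  induction cs with
  | nil => intro b j h; simp [firstZero] at h
  | cons c r ih =>
    intro b j h
    simp only [firstZero] at h
    by_cases h0 : b + balW c = 0
    · rw [if_pos h0] at h
      simp at h
      subst h
      refine ⟨by simp, ?_, by omega⟩
      simpa [List.take_succ_cons, balS_cons, balS] using h0
    · rw [if_neg h0] at h
      rcases Option.map_eq_some_iff.mp h with ⟨j', hj', rfl⟩
      obtain ⟨hlen, hz, hne⟩ := ih (b + balW c) j' hj'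
      refine ⟨by simp; omega, ?_, ?_⟩
      · rw [List.take_succ_cons, balS_cons]; omega
      · intro m hm
        cases m with
        | zero => simpa [List.take_succ_cons, balS_cons, balS] using h0
        | succ m' =>
          have := hne m' (by omega)
          rw [List.take_succ_cons, balS_cons]
          omega

theorem firstZero_none : ∀ (cs : List Char) (b : Int), firstZero cs b = none →
    ∀ m, m < cs.length → b + balS (cs.take (m + 1)) ≠ 0 := by
  intro cs
  induction cs with
  | nil => intro b _ m hm; simp at hm
  | cons c r ih =>
    intro b h m hm
    simp only [firstZero] at h
    by_cases h0 : b + balW c = 0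
    · simp [h0] at h
    · rw [if_neg h0] at h
      have hnone : firstZero r (b + balW c) = none := by
        cases hx : firstZero r (b + balW c) <;> simp [hx] at h ⊢
      cases m with
      | zero => simpa [List.take_succ_cons, balS_cons, balS] using h0
      | succ m' =>
        have := ih (b + balW c) hnone m' (by simpa using hm)
        rw [List.take_succ_cons, balS_cons]
        omega

theorem cutGo_none (cs : List Char) (b : Int) (i n : Nat) (h : firstZero cs b = none) :
    cutGo cs b i n = n := by rw [cutGo_eq_firstZero, h]

theorem cutGo_some (cs : List Char) (b : Int) (i n j : Nat) (h : firstZero cs b = some j) :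
    cutGo cs b i n = i + j + 1 := by rw [cutGo_eq_firstZero, h]

theorem cut_facts (l : List Char) (hl : l ≠ []) :
    1 ≤ cutGo l 0 0 l.length ∧ cutGo l 0 0 l.length ≤ l.length ∧
    (∀ m, 1 ≤ m → m < cutGo l 0 0 l.length → balS (l.take m) ≠ 0) ∧
    (balS (l.take (cutGo l 0 0 l.length)) = 0 ∨ cutGo l 0 0 l.length = l.length) := by
  have hlen : 1 ≤ l.length := by
    cases l
    · exact absurd rfl hl
    · simp
  cases h : firstZero l 0 with
  | none =>
    rw [cutGo_none l 0 0 l.length h]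
    have hz := firstZero_none l 0 h
    refine ⟨hlen, le_rfl, ?_, Or.inr rfl⟩
    intro m h1 h2
    have := hz (m - 1) (by omega)
    have hm : m - 1 + 1 = m := by omega
    rw [hm] at this
    omega
  | some j =>
    rw [cutGo_some l 0 0 l.length j h]
    obtain ⟨hlt, hz, hne⟩ := firstZero_some l 0 j h
    refine ⟨by omega, by omega, ?_, Or.inl ?_⟩
    · intro m h1 h2
      have := hne (m - 1) (by omega)
      have hm : m - 1 + 1 = m := by omega
      rw [hm] at this
      omega
    · have hjj : 0 + j + 1 = j + 1 := by omega
      rw [hjj]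
      omega

-- A's two counters vs B's single balance counter find the same split point.
theorem divide_cut_eq : ∀ (cs : List Char) (left right : Int) (i n : Nat),
    cs ≠ [] → n = i + cs.length → divideGo cs left right i + 1 = cutGo cs (left - right) i n := by
  intro cs
  induction cs with
  | nil => intro _ _ _ _ h _; exact absurd rfl h
  | cons c rest ih =>
    intro left right i n _ hn
    simp only [divideGo, cutGo]
    have hb : (if c = '(' then left + 1 else left) - (if c = '(' then right else right + 1)
        = left - right + (if c = '(' then 1 else -1) := by split <;> ring
    by_cases hbrk : (if c = '(' then left + 1 else left) = (if c = '(' then right else right + 1)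
    · have h0 : left - right + (if c = '(' then 1 else -1) = 0 := by rw [← hb]; omega
      rw [if_pos hbrk, if_pos h0]
    · have h0 : ¬ (left - right + (if c = '(' then 1 else -1) = 0) := by rw [← hb]; omega
      rw [if_neg hbrk, if_neg h0, ← hb]
      cases rest with
      | nil =>
        simp only [List.length_cons, List.length_nil] at hn
        simp [divideGo, cutGo, hn]
      | cons d ds =>
        exact ih _ _ _ _ (by simp) (by simp at hn ⊢; omega)

theorem cut_eq (c : Char) (rest : List Char) :
    cutGo (c :: rest) 0 0 (c :: rest).length = divideGo (c :: rest) 0 0 0 + 1 := by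
  have h := divide_cut_eq (c :: rest) 0 0 0 (c :: rest).length (by simp) (by simp)
  norm_num at h
  exact h.symm

-- A's '('-stack vs B's depth counter, on paren-only input.
theorem isCorrect_okGo : ∀ (cs : List Char) (k : Nat),
    ParenOnly cs → isCorrectGo (List.replicate k '(') cs = okGo cs (k : Int) := by
  intro cs
  induction cs with
  | nil => intro k _; rfl
  | cons x rest ih =>
    intro k hpo
    have hrest : ParenOnly rest := fun c hc => hpo c (by simp [hc])
    rcases hpo x (by simp) with hx | hx
    · subst hx
      simp only [isCorrectGo, okGo, reduceIte]
      have h1 : ¬ ((k : Int) + 1 < 0) := by omega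
      rw [show ('(' :: List.replicate k '(') = List.replicate (k + 1) '(' from rfl]
      rw [if_neg h1, ih (k + 1) hrest]
      norm_num
    · subst hx
      have hne : (')' : Char) ≠ '(' := by decide
      simp only [isCorrectGo, okGo, if_neg hne]
      cases k with
      | zero =>
        norm_num [List.replicate]
      | succ k' =>
        have hget : matchD.get? ')' = some '(' := by decide
        simp only [List.replicate_succ, hget, reduceIte]
        have h1 : ¬ ((↑(k' + 1) : Int) - 1 < 0) := by omega
        rw [if_neg h1, ih k' hrest]
        norm_num

theorem okGo_eq_isCorrect (u : List Char) (h : ParenOnly u) : okGo u 0 = is_correctA u := by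
  have := isCorrect_okGo u 0 h
  norm_num at this
  exact this.symm.trans rfl

-- when a block starts with a non-'(' character, both checks fail immediately
theorem notOk_head (c : Char) (u' : List Char) (hc : c ≠ '(') :
    okGo (c :: u') 0 = false ∧ is_correctA (c :: u') = false := by
  constructor
  · simp only [okGo, if_neg hc]
    norm_num
  · simp [is_correctA, isCorrectGo, hc]

-- A's dict-lookup flip vs B's map flip, on paren-only input.
theorem flip_eq (l : List Char) (h : ParenOnly l) : flipA l = flipB l := by
  unfold flipA flipB
  rw [PySem.List.foldl_append_singleton_eq_map]
  simp only [List.nil_append]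
  apply List.map_congr_left
  intro c hc
  rcases h c hc with rfl | rfl <;> decide

theorem parenOnly_mono {l m : List Char} (hsub : ∀ c ∈ m, c ∈ l) (h : ParenOnly l) : ParenOnly m :=
  fun c hc => h c (hsub c hc)

theorem parenOnly_of_getElem {u : List Char} (h : ∀ (j : Nat) (hj : j < u.length), u[j] = '(' ∨ u[j] = ')') :
    ParenOnly u := by
  intro x hx
  obtain ⟨j, hj, rfl⟩ := List.mem_iff_getElem.mp hx
  exact h j hj

theorem preB_at {l : List Char} (h : preB l = true) {j : Nat} (hj : j < l.length) :
    l[j] = '(' ∨ l[j] = ')' ∨ balS (l.take j) = 0 ∨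
      (balS (l.take j) < 0 ∧ (j = l.length - 1 ∨ balS (l.take (j + 1)) = 0)) := by
  unfold preB at h
  rw [List.all_eq_true] at h
  have := h j (List.mem_range.mpr hj)
  rw [List.getD_eq_getElem l ' ' hj] at this
  simp only [Bool.or_eq_true, beq_iff_eq, decide_eq_true_eq, Bool.and_eq_true] at this
  tauto

theorem preB_nil : preB [] = true := rfl

theorem slice_one_negone (xs : List Char) :
    PySem.List.slice xs (some 1) (some (-1)) = (xs.drop 1).take (xs.length - 2) := by
  simp only [PySem.List.slice, PySem.List.clampIdx]
  norm_num
  cases xs with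
  | nil => simp
  | cons c r =>
    simp only [if_neg (by simp : ¬ (c :: r = []))]
    have h1 : min 1 (c :: r).length = 1 := by simp
    have h2 : ((↑(c :: r).length : Int) + -1).toNat = r.length := by simp
    rw [h1, h2]
    simp

-- the balance keeps one sign strictly inside a block (it moves by ±1 and never hits 0)
theorem balS_pos_below (l : List Char) (K : Nat)
    (hne : ∀ m, 1 ≤ m → m < K → balS (l.take m) ≠ 0) (hK : K ≤ l.length)
    (h1 : balS (l.take 1) = 1) : ∀ m, 1 ≤ m → m < K → 0 < balS (l.take m) := by
  intro m
  induction m with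
  | zero => omega
  | succ m ih =>
    intro _ hmK
    cases Nat.eq_zero_or_pos m with
    | inl h => subst h; rw [h1]; omega
    | inr hm =>
      have hprev := ih (by omega) (by omega)
      have hstep := balS_take_succ l m (by omega)
      have hnz := hne (m + 1) (by omega) hmK
      rcases balW_cases (l[m]'(by omega)) with hw | hw <;> omega

theorem balS_neg_below (l : List Char) (K : Nat)
    (hne : ∀ m, 1 ≤ m → m < K → balS (l.take m) ≠ 0) (hK : K ≤ l.length)
    (h1 : balS (l.take 1) = -1) : ∀ m, 1 ≤ m → m < K → balS (l.take m) < 0 := by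
  intro m
  induction m with
  | zero => omega
  | succ m ih =>
    intro _ hmK
    cases Nat.eq_zero_or_pos m with
    | inl h => subst h; rw [h1]; omega
    | inr hm =>
      have hprev := ih (by omega) (by omega)
      have hstep := balS_take_succ l m (by omega)
      have hnz := hne (m + 1) (by omega) hmK
      rcases balW_cases (l[m]'(by omega)) with hw | hw <;> omega

-- a block starting with '(' is all parentheses (anything else would make A raise)
theorem parenOnly_block {l : List Char} {K : Nat} (hpre : preB l = true) (hK : K ≤ l.length)
    (hpos : ∀ m, 1 ≤ m → m < K → 0 < balS (l.take m))
    (hhead : ∀ (h0 : 0 < l.length), l[0] = '(') : ParenOnly (l.take K) := by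
  apply parenOnly_of_getElem
  intro j hj
  have hjK : j < K := by simp at hj; omega
  have hjl : j < l.length := by omega
  rw [List.getElem_take]
  rcases preB_at hpre hjl with h | h | h | ⟨hlt, _⟩
  · exact Or.inl h
  · exact Or.inr h
  · cases Nat.eq_zero_or_pos j with
    | inl h0 => subst h0; exact Or.inl (hhead (by omega))
    | inr hj1 => exact absurd h (by have := hpos j hj1 hjK; omega)
  · cases Nat.eq_zero_or_pos j with
    | inl h0 =>
      subst h0
      simp [balS] at hlt
    | inr hj1 => exact absurd hlt (by have := hpos j hj1 hjK; omega)

-- in a block starting with a non-'(' character, everything strictly inside is a parenthesis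
theorem parenOnly_interior {l : List Char} {K : Nat} (hpre : preB l = true) (hK : K ≤ l.length)
    (hneg : ∀ m, 1 ≤ m → m < K → balS (l.take m) < 0) :
    ParenOnly (((l.take K).drop 1).take ((l.take K).length - 2)) := by
  apply parenOnly_of_getElem
  intro m hm
  have hKu : (l.take K).length = K := by simp; omega
  have hmK : m < K - 2 := by simp [hKu] at hm; omega
  have h1m : 1 + m < K := by omega
  have hjl : 1 + m < l.length := by omega
  have he : (((l.take K).drop 1).take ((l.take K).length - 2))[m]'hm
      = l[1 + m]'hjl := by
    rw [List.getElem_take, List.getElem_drop, List.getElem_take]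
  rw [he]
  rcases preB_at hpre hjl with h | h | h | ⟨_, hor⟩
  · exact Or.inl h
  · exact Or.inr h
  · exact absurd h (by have := hneg (1 + m) (by omega) h1m; omega)
  · rcases hor with hlast | hz
    · exact absurd hlast (by omega)
    · exact absurd hz (by have := hneg (1 + m + 1) (by omega) (by omega); omega)

-- the tail after a completed block still satisfies the precondition
theorem preB_drop {l : List Char} {K : Nat} (hpre : preB l = true) (hK : K ≤ l.length)
    (h0 : balS (l.take K) = 0) : preB (l.drop K) = true := by
  unfold preB
  rw [List.all_eq_true]
  intro j hjmem
  have hj : j < (l.drop K).length := List.mem_range.mp hjmem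
  have hjl : K + j < l.length := by simp at hj; omega
  have e1 : (l.drop K).getD j ' ' = l[K + j]'hjl := by
    rw [List.getD_eq_getElem _ ' ' hj, List.getElem_drop]
  have e2 : balS ((l.drop K).take j) = balS (l.take (K + j)) := by
    have h : l.take (K + j) = l.take K ++ (l.drop K).take j := List.take_add
    rw [h, balS_append, h0]
    omega
  have e3 : balS ((l.drop K).take (j + 1)) = balS (l.take (K + j + 1)) := by
    have h : l.take (K + (j + 1)) = l.take K ++ (l.drop K).take (j + 1) := List.take_add
    rw [show K + j + 1 = K + (j + 1) from rfl, h, balS_append, h0]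
    omega
  have e4 : (j = (l.drop K).length - 1) ↔ (K + j = l.length - 1) := by
    simp only [List.length_drop]
    omega
  have hgoal : l[K + j] = '(' ∨ l[K + j] = ')' ∨ balS ((l.drop K).take j) = 0 ∨
      (balS ((l.drop K).take j) < 0 ∧ (j = (l.drop K).length - 1 ∨ balS ((l.drop K).take (j + 1)) = 0)) := by
    rcases preB_at hpre hjl with h | h | h | ⟨hlt, hor⟩
    · exact Or.inl h
    · exact Or.inr (Or.inl h)
    · exact Or.inr (Or.inr (Or.inl (by omega)))
    · refine Or.inr (Or.inr (Or.inr ⟨by omega, ?_⟩))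
      rcases hor with hlast | hz
      · exact Or.inl (e4.mpr hlast)
      · exact Or.inr (by omega)
  rw [e1]
  simp only [Bool.or_eq_true, beq_iff_eq, decide_eq_true_eq, Bool.and_eq_true]
  tauto

-- Loop invariant: the iterative loop equals prefixes ++ recursion's result ++ reversed suffixes.
theorem mbBGo_eq : ∀ (n : Nat) (l : List Char) (pre suf : List (List Char)),
    l.length ≤ n → preB l = true →
    mbBGo l pre suf = pre.flatten ++ mbA l ++ suf.reverse.flatten := by
  intro n
  induction n with
  | zero =>
    intro l pre suf hl _
    have : l = [] := List.eq_nil_of_length_eq_zero (by omega)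
    subst this
    simp [mbBGo, mbA]
  | succ n ih =>
    intro l pre suf hl hpre
    cases l with
    | nil => simp [mbBGo, mbA]
    | cons c rest =>
      obtain ⟨hK1, hKlen, hne, hzero⟩ := cut_facts (c :: rest) (by simp)
      rw [mbBGo]
      rw [cut_eq c rest] at hK1 hKlen hne hzero ⊢
      set K := divideGo (c :: rest) 0 0 0 + 1 with hKdef
      have hmb : mbA (c :: rest)
          = if is_correctA ((c :: rest).take K)
            then (c :: rest).take K ++ mbA ((c :: rest).drop K)
            else '(' :: (mbA ((c :: rest).drop K) ++ ')' ::
                  flipA (PySem.List.slice ((c :: rest).take K) (some 1) (some (-1)))) := by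
        rw [mbA]
        simp [divideA, ← hKdef]
      rw [hmb]
      have hvpre : preB ((c :: rest).drop K) = true := by
        rcases hzero with h0 | hKl
        · exact preB_drop hpre hKlen h0
        · rw [hKl, List.drop_length]
          exact preB_nil
      have hvlen : ((c :: rest).drop K).length ≤ n := by
        simp only [List.length_drop, List.length_cons]
        simp only [List.length_cons] at hl
        omega
      by_cases hc : c = '('
      · have h1 : balS ((c :: rest).take 1) = 1 := by
          subst hc
          simp [List.take_succ_cons, balS_singleton, balW]
        have hpos := balS_pos_below (c :: rest) K hne hKlen h1
        have hpou : ParenOnly ((c :: rest).take K) :=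
          parenOnly_block hpre hKlen hpos (fun _ => by simpa using hc)
        rw [okGo_eq_isCorrect _ hpou]
        by_cases hcor : is_correctA ((c :: rest).take K)
        · rw [if_pos hcor, if_pos hcor, ih _ _ _ hvlen hvpre]
          simp [List.flatten_append]
        · have hslice : ParenOnly (PySem.List.slice ((c :: rest).take K) (some 1) (some (-1))) :=
            parenOnly_mono (fun x hx => PySem.List.mem_of_mem_slice _ _ _ hx) hpou
          rw [if_neg hcor, if_neg hcor, ih _ _ _ hvlen hvpre, flip_eq _ hslice]
          simp [List.flatten_append]
      · have h1 : balS ((c :: rest).take 1) = -1 := by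
          simp [List.take_succ_cons, balS_singleton, balW, hc]
        have hneg := balS_neg_below (c :: rest) K hne hKlen h1
        have hslice : ParenOnly (PySem.List.slice ((c :: rest).take K) (some 1) (some (-1))) := by
          rw [slice_one_negone]
          exact parenOnly_interior hpre hKlen hneg
        have hu_eq : (c :: rest).take K = c :: rest.take (K - 1) := by
          obtain ⟨K', hK'⟩ : ∃ K', K = K' + 1 := ⟨K - 1, by omega⟩
          rw [hK']
          simp [List.take_succ_cons]
        obtain ⟨hokf, hcorf⟩ := notOk_head c (rest.take (K - 1)) hc
        rw [← hu_eq] at hokf hcorf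
        rw [hokf, hcorf]
        simp only [Bool.false_eq_true, if_false]
        rw [ih _ _ _ hvlen hvpre, flip_eq _ hslice]
        simp [List.flatten_append]

theorem pre_preB {p : String} (h : Pre_make_balance p) : preB p.toList = true := h

-- ===== VERDICT (by name: the statement is the Claim_ definition above) =====
theorem make_balance_spec : Claim_equal_make_balance := by
  intro p _ hpre
  unfold Spec_make_balance make_balance make_balance_alt
  rw [mbBGo_eq p.toList.length p.toList [] [] le_rfl (pre_preB hpre)]
  simp
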